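-- pv_equiv track=rewrite | github.com/shadowfax1312/engram | brain/ingest.py | _identify_user
-- ===== SOURCE A (Python) =====
-- from collections import defaultdict
--
-- def _identify_user(messages):
--     """Heuristic: find the user's sender name from first 50 messages."""
--     exclude = {"life boss", "shailaja", "life boss❤️"}
--     counts = defaultdict(int)
--     for _, sender, _ in messages[:50]:
--         name_lower = sender.lower().strip()
--         if name_lower not in exclude:
--             counts[name_lower] += 1
--
--     if not counts:
--         return None
--
--     # Most common non-excluded sender
--     best = max(counts, key=counts.get)
--     # Return the original-case version
--     for _, sender, _ in messages[:50]:
--         if sender.lower().strip() == best: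
--             return sender
--     return best
-- ===== SOURCE B (Python) =====
-- def _identify_user(messages):
--     """Heuristic: find the user's sender name from first 50 messages."""
--     exclude = {"life boss", "shailaja", "life boss\u2764\ufe0f"}
--     info = {}
--     for _, sender, _ in messages[:50]:
--         key = sender.lower().strip()
--         if key in exclude:
--             continue
--         entry = info.get(key)
--         if entry is None:
--             info[key] = (1, sender)
--         else:
--             info[key] = (entry[0] + 1, entry[1])
--     best = max(info.items(), key=lambda kv: kv[1][0], default=None)
--     return None if best is None else best[1][1]
-- ===== Notes on version B (the rewrite author's own statement) =====
-- stated objective: simpler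
-- what changed: A counts senders in one loop and then re-scans the first 50 messages a second time to recover the original-case spelling; B does a single pass storing per lowered sender both the running count and the first original-case spelling, then takes the max over the dict items directly.
import Mathlib
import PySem

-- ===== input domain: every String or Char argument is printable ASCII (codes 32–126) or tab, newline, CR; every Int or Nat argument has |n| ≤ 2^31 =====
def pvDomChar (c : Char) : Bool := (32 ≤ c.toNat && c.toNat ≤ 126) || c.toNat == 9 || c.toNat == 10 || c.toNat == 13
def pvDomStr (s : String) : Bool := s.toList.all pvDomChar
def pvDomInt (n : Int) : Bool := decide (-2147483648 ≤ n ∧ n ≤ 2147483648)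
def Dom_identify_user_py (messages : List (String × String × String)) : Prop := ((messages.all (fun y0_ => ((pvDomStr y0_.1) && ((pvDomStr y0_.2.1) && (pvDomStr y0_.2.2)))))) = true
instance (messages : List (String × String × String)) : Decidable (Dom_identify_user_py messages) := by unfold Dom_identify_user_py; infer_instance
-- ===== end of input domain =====

-- B replaces A's count-then-rescan (a counting pass plus a second pass over the messages to
-- recover the original-case spelling) by a single pass that stores, per lowered sender, both the
-- running count and the first original-case spelling; objective: simpler (one pass, no re-scan).

-- ===== PORT A =====
-- lowered/stripped key of a sender, shared by both ports (sender.lower().strip())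
def pvKey (s : String) : String := PySem.Str.strip (PySem.Str.lower s)

-- the excluded-senders set literal
def pvExclude : PySem.Set String := PySem.Set.ofList ["life boss", "shailaja", "life boss❤️"]

-- loop body of A's counting loop
def pvStepA (d : PySem.Dict String Int) (m : String × String × String) : PySem.Dict String Int :=
  let nl := pvKey m.2.1
  if nl ∈ pvExclude then d else d.modify nl 0 (· + 1)

def identify_user_py (messages : List (String × String × String)) : Option String :=
  let counts := (PySem.List.slice messages none (some 50)).foldl pvStepA PySem.Dict.empty
  if counts.items = [] then none
  else
    match PySem.List.max? counts.keys (fun k => counts.getD k 0) with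
    | none => none  -- unreachable: counts is nonempty
    | some best =>
      -- second pass: first sender whose lowered key equals best (the 'for … return sender' loop)
      match (PySem.List.slice messages none (some 50)).find? (fun m => pvKey m.2.1 == best) with
      | some m => some m.2.1
      | none => some best

-- ===== PORT B =====
-- loop body of B's single pass: per key keep (running count, first original-case sender)
def pvStepB (e : PySem.Dict String (Int × String)) (m : String × String × String) :
    PySem.Dict String (Int × String) :=
  let k := pvKey m.2.1
  if k ∈ pvExclude then e
  else
    match e.get? k with
    | none => e.insert k (1, m.2.1)
    | some v => e.insert k (v.1 + 1, v.2)

def identify_user_py_alt (messages : List (String × String × String)) : Option String :=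
  let info := (PySem.List.slice messages none (some 50)).foldl pvStepB PySem.Dict.empty
  -- max(info.items(), key=lambda kv: kv[1][0], default=None)
  match PySem.List.max? info.items (fun kv => kv.2.1) with
  | none => none
  | some best => some best.2.2

-- ===== PRECONDITION & SPEC =====
def Spec_identify_user_py (messages : List (String × String × String)) (out : Option String) : Prop := out = identify_user_py_alt messages
instance (messages : List (String × String × String)) (out : Option String) : Decidable (Spec_identify_user_py messages out) := by unfold Spec_identify_user_py; infer_instance

-- ===== CLAIM (what is proved, stated in full; the proofs are below) =====
def Claim_equal_identify_user_py : Prop := ∀ (messages : List (String × String × String)), Dom_identify_user_py messages → Spec_identify_user_py messages (identify_user_py messages)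

-- ===== LEMMAS AND PROOFS =====

-- projection from B's entries to A's entries
def pvProj (p : String × (Int × String)) : String × Int := (p.1, p.2.1)

-- get? transports along the item-wise projection
theorem pv_get?_rel (d : PySem.Dict String Int) (e : PySem.Dict String (Int × String))
    (h : e.items.map pvProj = d.items) (k : String) :
    d.get? k = (e.get? k).map (·.1) := by
  simp only [PySem.Dict.get?, ← h, List.find?_map]
  have hp : ((fun (p : String × Int) => p.1 == k) ∘ pvProj)
      = (fun (p : String × (Int × String)) => p.1 == k) := rfl
  rw [hp]
  cases hf : e.items.find? (fun p => p.1 == k) <;> simp [pvProj]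

-- one step preserves the item-wise projection relation
theorem pv_step_rel (d : PySem.Dict String Int) (e : PySem.Dict String (Int × String))
    (h : e.items.map pvProj = d.items) (m : String × String × String) :
    (pvStepB e m).items.map pvProj = (pvStepA d m).items := by
  unfold pvStepA pvStepB
  by_cases hex : pvKey m.2.1 ∈ pvExclude
  · simp only [hex, if_true, h]
  · simp only [hex, if_false]
    have hget := pv_get?_rel d e h (pvKey m.2.1)
    simp only [PySem.Dict.modify, PySem.Dict.getD_eq_get?_getD, hget]
    cases hE : e.get? (pvKey m.2.1) with
    | none =>
      have heC : e.contains (pvKey m.2.1) = false := by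
        rw [PySem.Dict.contains_eq_isSome_get?, hE]; rfl
      have hdC : d.contains (pvKey m.2.1) = false := by
        rw [PySem.Dict.contains_eq_isSome_get?, hget, hE]; rfl
      simp only [Option.map_none, Option.getD_none]
      rw [PySem.Dict.items_insert_of_not_contains _ _ heC,
        PySem.Dict.items_insert_of_not_contains _ _ hdC]
      simp [pvProj, h]
    | some v =>
      have heC : e.contains (pvKey m.2.1) = true := by
        rw [PySem.Dict.contains_eq_isSome_get?, hE]; rfl
      have hdC : d.contains (pvKey m.2.1) = true := by
        rw [PySem.Dict.contains_eq_isSome_get?, hget, hE]; rfl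
      simp only [Option.map_some, Option.getD_some]
      rw [PySem.Dict.items_insert_of_contains _ _ heC,
        PySem.Dict.items_insert_of_contains _ _ hdC, ← h, List.map_map, List.map_map]
      refine List.map_congr_left (fun p _ => ?_)
      by_cases hp : p.1 = pvKey m.2.1 <;> simp [Function.comp, pvProj, hp]

-- the whole loops preserve the relation
theorem pv_fold_rel (l : List (String × String × String)) (d : PySem.Dict String Int)
    (e : PySem.Dict String (Int × String)) (h : e.items.map pvProj = d.items) :
    (l.foldl pvStepB e).items.map pvProj = (l.foldl pvStepA d).items := by
  induction l generalizing d e with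
  | nil => exact h
  | cons m l ih =>
    simp only [List.foldl_cons]
    exact ih _ _ (pv_step_rel d e h m)

-- B's loop never changes the stored original-case spelling of an existing key
theorem pv_fold_snd_stable (l : List (String × String × String))
    (e : PySem.Dict String (Int × String)) (k : String) (v : Int × String)
    (h : e.get? k = some v) : ∃ c, (l.foldl pvStepB e).get? k = some (c, v.2) := by
  induction l generalizing e v with
  | nil => exact ⟨v.1, by simpa [h]⟩
  | cons m l ih =>
    simp only [List.foldl_cons]
    unfold pvStepB
    by_cases hex : pvKey m.2.1 ∈ pvExclude
    · rw [if_pos hex]; exact ih e v h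
    · rw [if_neg hex]
      by_cases hk : pvKey m.2.1 = k
      · subst hk
        simp only [h]
        exact ih _ (v.1 + 1, v.2) (PySem.Dict.get?_insert_self _ _ _)
      · have hne : k ≠ pvKey m.2.1 := fun hh => hk hh.symm
        cases hE : e.get? (pvKey m.2.1) with
        | none =>
          exact ih _ v (by rw [PySem.Dict.get?_insert_of_ne _ _ hne]; exact h)
        | some w =>
          exact ih _ v (by rw [PySem.Dict.get?_insert_of_ne _ _ hne]; exact h)

-- for a non-excluded key, the stored spelling is the first matching sender of the list
theorem pv_fold_first (l : List (String × String × String))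
    (e : PySem.Dict String (Int × String)) (k : String)
    (hex : k ∉ pvExclude) (h0 : e.get? k = none) :
    ((l.foldl pvStepB e).get? k).map (·.2) =
      (l.find? (fun m => pvKey m.2.1 == k)).map (·.2.1) := by
  induction l generalizing e with
  | nil => simp [h0]
  | cons m l ih =>
    simp only [List.foldl_cons]
    by_cases hk : pvKey m.2.1 = k
    · have hstep : pvStepB e m = e.insert k (1, m.2.1) := by
        unfold pvStepB
        rw [hk, if_neg hex, h0]
      rw [hstep]
      obtain ⟨c, hc⟩ := pv_fold_snd_stable l (e.insert k (1, m.2.1)) k (1, m.2.1)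
        (PySem.Dict.get?_insert_self e k (1, m.2.1))
      rw [List.find?_cons_of_pos (by simp [hk]), hc]
      rfl
    · have hne : k ≠ pvKey m.2.1 := fun hh => hk hh.symm
      have hstep : (pvStepB e m).get? k = none := by
        unfold pvStepB
        by_cases he : pvKey m.2.1 ∈ pvExclude
        · rw [if_pos he]; exact h0
        · rw [if_neg he]
          cases hE : e.get? (pvKey m.2.1) with
          | none =>
            rw [PySem.Dict.get?_insert_of_ne _ _ hne]; exact h0
          | some w =>
            rw [PySem.Dict.get?_insert_of_ne _ _ hne]; exact h0
      rw [List.find?_cons_of_neg (by simp [hk])]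
      exact ih _ hstep

-- B's loop only ever stores non-excluded keys
theorem pv_fold_keys_ok (l : List (String × String × String))
    (e : PySem.Dict String (Int × String))
    (h : ∀ k ∈ e.keys, k ∉ pvExclude) :
    ∀ k ∈ (l.foldl pvStepB e).keys, k ∉ pvExclude := by
  induction l generalizing e with
  | nil => exact h
  | cons m l ih =>
    simp only [List.foldl_cons]
    refine ih _ ?_
    intro k hk
    unfold pvStepB at hk
    by_cases hex : pvKey m.2.1 ∈ pvExclude
    · rw [if_pos hex] at hk; exact h k hk
    · rw [if_neg hex] at hk
      cases hE : e.get? (pvKey m.2.1) with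
      | none =>
        simp only [hE] at hk
        rcases (PySem.Dict.mem_keys_insert _ _ _ _).1 hk with rfl | hk'
        · exact hex
        · exact h k hk'
      | some w =>
        simp only [hE] at hk
        rcases (PySem.Dict.mem_keys_insert _ _ _ _).1 hk with rfl | hk'
        · exact hex
        · exact h k hk'

-- B's loop keeps the keys nodup
theorem pv_fold_nodup (l : List (String × String × String))
    (e : PySem.Dict String (Int × String)) (h : e.keys.Nodup) :
    (l.foldl pvStepB e).keys.Nodup := by
  induction l generalizing e with
  | nil => exact h
  | cons m l ih =>
    simp only [List.foldl_cons]
    refine ih _ ?_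
    unfold pvStepB
    by_cases hex : pvKey m.2.1 ∈ pvExclude
    · rw [if_pos hex]; exact h
    · rw [if_neg hex]
      cases hE : e.get? (pvKey m.2.1) with
      | none => exact PySem.Dict.nodup_keys_insert _ _ _ h
      | some w => exact PySem.Dict.nodup_keys_insert _ _ _ h

-- max? over a mapped list
theorem pv_max?_map_aux {α β κ : Type} [LT κ] [DecidableLT κ] (h : α → β) (g : β → κ) :
    ∀ (xs : List α) (acc : Option α),
      List.foldl (fun a y => match a with
        | none => some (h y)
        | some m => if g m < g (h y) then some (h y) else some m) (acc.map h) xs =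
      (List.foldl (fun a x => match a with
        | none => some x
        | some m => if g (h m) < g (h x) then some x else some m) acc xs).map h
  | [], acc => rfl
  | x :: xs, acc => by
      simp only [List.foldl_cons]
      cases acc with
      | none =>
        simp only [Option.map_none]
        exact pv_max?_map_aux h g xs (some x)
      | some m =>
        simp only [Option.map_some]
        by_cases hlt : g (h m) < g (h x)
        · rw [if_pos hlt, if_pos hlt]
          exact pv_max?_map_aux h g xs (some x)
        · rw [if_neg hlt, if_neg hlt]
          exact pv_max?_map_aux h g xs (some m)

theorem pv_max?_map {α β κ : Type} [LT κ] [DecidableLT κ] (xs : List α) (h : α → β) (g : β → κ) :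
    PySem.List.max? (xs.map h) g = (PySem.List.max? xs (fun x => g (h x))).map h := by
  simp only [PySem.List.max?, List.foldl_map]
  exact pv_max?_map_aux h g xs none

-- max? only depends on the key function on the elements of the list
theorem pv_max?_congr_aux {α κ : Type} [LT κ] [DecidableLT κ] :
    ∀ (xs : List α) (g1 g2 : α → κ), (∀ x ∈ xs, g1 x = g2 x) →
    ∀ (acc : Option α), (∀ x, acc = some x → g1 x = g2 x) →
      List.foldl (fun acc x => match acc with
        | none => some x
        | some m => if g1 m < g1 x then some x else some m) acc xs =
      List.foldl (fun acc x => match acc with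
        | none => some x
        | some m => if g2 m < g2 x then some x else some m) acc xs
  | [], _, _, _, _, _ => rfl
  | x :: xs, g1, g2, h, acc, hacc => by
      have hx : g1 x = g2 x := h x List.mem_cons_self
      have h' : ∀ y ∈ xs, g1 y = g2 y := fun y hy => h y (List.mem_cons_of_mem _ hy)
      simp only [List.foldl_cons]
      cases acc with
      | none =>
        exact pv_max?_congr_aux xs g1 g2 h' (some x)
          (by intro y hy; cases hy; exact hx)
      | some m =>
        have hm : g1 m = g2 m := hacc m rfl
        dsimp only
        rw [hm, hx]
        by_cases hlt : g2 m < g2 x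
        · rw [if_pos hlt]
          exact pv_max?_congr_aux xs g1 g2 h' (some x) (by intro y hy; cases hy; exact hx)
        · rw [if_neg hlt]
          exact pv_max?_congr_aux xs g1 g2 h' (some m) (by intro y hy; cases hy; exact hm)

theorem pv_max?_congr {α κ : Type} [LT κ] [DecidableLT κ] (xs : List α) (g1 g2 : α → κ)
    (h : ∀ x ∈ xs, g1 x = g2 x) : PySem.List.max? xs g1 = PySem.List.max? xs g2 := by
  simp only [PySem.List.max?]
  exact pv_max?_congr_aux xs g1 g2 h none (by intro x hx; cases hx)

-- the two ports agree on the sliced message list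
theorem pv_main (msgs : List (String × String × String)) :
    (if (msgs.foldl pvStepA PySem.Dict.empty).items = [] then (none : Option String)
     else
       match PySem.List.max? (msgs.foldl pvStepA PySem.Dict.empty).keys
           (fun k => (msgs.foldl pvStepA PySem.Dict.empty).getD k 0) with
       | none => none
       | some best =>
         match msgs.find? (fun m => pvKey m.2.1 == best) with
         | some m => some m.2.1
         | none => some best) =
    (match PySem.List.max? (msgs.foldl pvStepB PySem.Dict.empty).items (fun kv => kv.2.1) with
     | none => none
     | some best => some best.2.2) := by
  set D := msgs.foldl pvStepA PySem.Dict.empty with hD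
  set E := msgs.foldl pvStepB PySem.Dict.empty with hE
  have hrel : E.items.map pvProj = D.items := pv_fold_rel msgs _ _ rfl
  have hnodup : E.keys.Nodup := pv_fold_nodup msgs _ (by simp [PySem.Dict.empty, PySem.Dict.keys])
  cases hbest : PySem.List.max? E.items (fun kv => kv.2.1) with
  | none =>
    have hnil : E.items = [] := (PySem.List.max?_eq_none_iff _ _).1 hbest
    have hDnil : D.items = [] := by rw [← hrel, hnil]; rfl
    simp [hDnil]
  | some kv =>
    have hmem : kv ∈ E.items := PySem.List.max?_mem hbest
    have hnil : E.items ≠ [] := by intro h; rw [h] at hmem; cases hmem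
    have hDnil : D.items ≠ [] := by
      intro h; apply hnil; rw [← hrel] at h; exact List.map_eq_nil_iff.1 h
    rw [if_neg hDnil]
    have hget : E.get? kv.1 = some kv.2 :=
      PySem.Dict.get?_of_mem_items E (by exact hmem) hnodup
    have hagree : ∀ p ∈ E.items, D.getD p.1 0 = p.2.1 := by
      intro p hp
      have hgp : E.get? p.1 = some p.2 := PySem.Dict.get?_of_mem_items E (by exact hp) hnodup
      rw [PySem.Dict.getD_eq_get?_getD, pv_get?_rel D E hrel p.1, hgp]
      rfl
    have hkeys : D.keys = E.items.map (fun p => p.1) := by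
      simp only [PySem.Dict.keys, ← hrel, List.map_map]
      rfl
    have hmax : PySem.List.max? D.keys (fun k => D.getD k 0) = some kv.1 := by
      rw [hkeys, pv_max?_map E.items (fun p => p.1) (fun k => D.getD k 0),
        pv_max?_congr E.items _ _ hagree, hbest]
      rfl
    rw [hmax]
    have hex : kv.1 ∉ pvExclude :=
      pv_fold_keys_ok msgs PySem.Dict.empty (by intro k hk; cases hk) kv.1
        (PySem.Dict.mem_keys_of_mem_items E hmem)
    have hfirst := pv_fold_first msgs PySem.Dict.empty kv.1 hex (PySem.Dict.get?_empty _)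
    rw [← hE, hget] at hfirst
    cases hfind : msgs.find? (fun m => pvKey m.2.1 == kv.1) with
    | none => rw [hfind] at hfirst; cases hfirst
    | some m =>
      rw [hfind] at hfirst
      simp only [Option.map_some, Option.some.injEq] at hfirst
      simp [hfind, hfirst]

-- ===== VERDICT (by name: the statement is the Claim_ definition above) =====
theorem identify_user_py_spec : Claim_equal_identify_user_py := by
  intro messages _
  unfold Spec_identify_user_py identify_user_py identify_user_py_alt
  exact pv_main (PySem.List.slice messages none (some 50))
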